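-- pv_equiv track=rewrite | github.com/rogerhyam/wfo-md-sync | src/wfo.py | splitFileContent
-- ===== SOURCE A (Python) =====
-- def splitFileContent(content):
--
--     section = 'meta'
--     sectionData = {'meta': '', 'wfo': '', 'body': ''}
--     lineCount = 0
--
--     # line at a time
--     for line in content.splitlines():
--
--         # if the first line is not --- then we skip
--         # metadata and go straight to wfo
--         if lineCount == 0 and line != '---':
--             section = 'wfo'
--
--         # actually add the line
--         sectionData[section] += line + "\n"
--
--         # --- marks end of meta section
--         if lineCount > 0 and section == 'meta' and line == '---':
--             section = 'wfo'
--
--         # --- marks end of wfo section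
--         if lineCount > 0 and section == 'wfo' and line.strip() == '---':
--             section = 'body'
--
--         lineCount += 1
--
--     return sectionData
-- ===== SOURCE B (Python) =====
-- def splitFileContent(content):
--     lines = content.splitlines()
--
--     def join(piece):
--         return ''.join(l + '\n' for l in piece)
--
--     if lines and lines[0] == '---':
--         # frontmatter present: the first exact '---' after line 0 closes meta,
--         # and (by the state machine's cascade) everything after it is body
--         end = next((i for i in range(1, len(lines)) if lines[i] == '---'), None)
--         if end is None:
--             return {'meta': join(lines), 'wfo': '', 'body': ''}
--         return {'meta': join(lines[:end + 1]),
--                 'wfo': '',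
--                 'body': join(lines[end + 1:])}
--     else:
--         # no frontmatter: wfo runs until the first line (after index 0) whose
--         # strip() is '---'; the rest is body
--         end = next((j for j in range(1, len(lines)) if lines[j].strip() == '---'), None)
--         if end is None:
--             return {'meta': '', 'wfo': join(lines), 'body': ''}
--         return {'meta': '',
--                 'wfo': join(lines[:end + 1]),
--                 'body': join(lines[end + 1:])}
-- ===== Notes on version B (the rewrite author's own statement) =====
-- stated objective: simpler
-- what changed: A runs a per-line state machine accumulating into a dict; B splits the content into a line list once, locates the single delimiter index with a first-match search (exact '---' after a frontmatter start, otherwise the first stripped '---'), and builds the three sections by slicing and joining.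
import Mathlib
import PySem

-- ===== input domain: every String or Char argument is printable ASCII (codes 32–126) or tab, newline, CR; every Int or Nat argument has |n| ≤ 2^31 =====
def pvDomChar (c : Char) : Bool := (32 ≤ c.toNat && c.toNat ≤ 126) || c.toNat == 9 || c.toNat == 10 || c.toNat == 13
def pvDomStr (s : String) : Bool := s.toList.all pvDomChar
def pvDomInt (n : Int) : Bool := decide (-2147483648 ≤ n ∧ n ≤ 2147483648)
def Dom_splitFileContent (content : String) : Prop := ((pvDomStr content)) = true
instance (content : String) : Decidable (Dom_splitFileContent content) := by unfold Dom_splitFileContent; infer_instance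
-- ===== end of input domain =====

-- B replaces A's per-line state machine by a two-boundary-search decomposition
-- (splitlines, locate the one delimiter line that matters, slice and join); objective: simpler.

-- ===== PORT A =====
-- the loop body of A's single pass: state (section, sectionData, lineCount) updated by one line
def pvStepA (st : String × PySem.Dict String String × Int) (line : String) :
    String × PySem.Dict String String × Int :=
  let sec := if st.2.2 == 0 && line != "---" then "wfo" else st.1
  let d := st.2.1.insert sec (st.2.1.getD sec "" ++ line ++ "\n")
  let sec := if decide (0 < st.2.2) && sec == "meta" && line == "---" then "wfo" else sec
  let sec := if decide (0 < st.2.2) && sec == "wfo" && PySem.Str.strip line == "---" then "body" else sec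
  (sec, d, st.2.2 + 1)

def splitFileContent (content : String) : List (String × String) :=
  let init : PySem.Dict String String :=
    ((PySem.Dict.empty.insert "meta" "").insert "wfo" "").insert "body" ""
  ((PySem.Str.splitlines content).foldl pvStepA ("meta", init, 0)).2.1.items

-- ===== PORT B =====
-- Source B's helper join: ''.join(l + '\n' for l in piece)
def pvJoinLines : List String → String
  | [] => ""
  | l :: rest => l ++ "\n" ++ pvJoinLines rest

def splitFileContent_alt (content : String) : List (String × String) :=
  let lines := PySem.Str.splitlines content
  if lines.head? == some "---" then
    match (lines.drop 1).findIdx? (· == "---") with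
    | none => [("meta", pvJoinLines lines), ("wfo", ""), ("body", "")]
    | some i => [("meta", pvJoinLines (lines.take (i + 2))), ("wfo", ""),
                 ("body", pvJoinLines (lines.drop (i + 2)))]
  else
    match (lines.drop 1).findIdx? (fun l => PySem.Str.strip l == "---") with
    | none => [("meta", ""), ("wfo", pvJoinLines lines), ("body", "")]
    | some j => [("meta", ""), ("wfo", pvJoinLines (lines.take (j + 2))),
                 ("body", pvJoinLines (lines.drop (j + 2)))]

-- ===== PRECONDITION & SPEC =====
def Spec_splitFileContent (content : String) (out : List (String × String)) : Prop := out = splitFileContent_alt content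
instance (content : String) (out : List (String × String)) : Decidable (Spec_splitFileContent content out) := by unfold Spec_splitFileContent; infer_instance

-- ===== CLAIM (what is proved, stated in full; the proofs are below) =====
def Claim_equal_splitFileContent : Prop := ∀ (content : String), Dom_splitFileContent content → Spec_splitFileContent content (splitFileContent content)

-- ===== LEMMAS AND PROOFS =====

-- A's dict always holds exactly the keys meta/wfo/body, in insertion order
def pvD3 (m w b : String) : PySem.Dict String String :=
  PySem.Dict.mk [("meta", m), ("wfo", w), ("body", b)]

theorem pvD3_insert_meta (m w b x : String) : (pvD3 m w b).insert "meta" x = pvD3 x w b := rfl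
theorem pvD3_insert_wfo (m w b x : String) : (pvD3 m w b).insert "wfo" x = pvD3 m x b := rfl
theorem pvD3_insert_body (m w b x : String) : (pvD3 m w b).insert "body" x = pvD3 m w x := rfl
theorem pvD3_getD_meta (m w b v : String) : (pvD3 m w b).getD "meta" v = m := rfl
theorem pvD3_getD_wfo (m w b v : String) : (pvD3 m w b).getD "wfo" v = w := rfl
theorem pvD3_getD_body (m w b v : String) : (pvD3 m w b).getD "body" v = b := rfl

theorem pvStepA_body (line m w b : String) (n : Int) (hn : 0 < n) :
    pvStepA ("body", pvD3 m w b, n) line = ("body", pvD3 m w (b ++ line ++ "\n"), n + 1) := by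
  have h0 : (n == (0:Int)) = false := by simpa using (by omega : ¬ n = 0)
  simp [pvStepA, h0, pvD3_getD_body, pvD3_insert_body]

theorem pvStepA_wfo (line m w b : String) (n : Int) (hn : 0 < n) :
    pvStepA ("wfo", pvD3 m w b, n) line
      = (if PySem.Str.strip line == "---" then "body" else "wfo",
         pvD3 m (w ++ line ++ "\n") b, n + 1) := by
  have h0 : (n == (0:Int)) = false := by simpa using (by omega : ¬ n = 0)
  have h1 : decide (0 < n) = true := by simpa using hn
  simp [pvStepA, h0, h1, pvD3_getD_wfo, pvD3_insert_wfo]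

-- a line that closes the meta section immediately cascades through 'wfo' into 'body'
theorem pvStepA_meta (line m w b : String) (n : Int) (hn : 0 < n) :
    pvStepA ("meta", pvD3 m w b, n) line
      = (if line == "---" then "body" else "meta",
         pvD3 (m ++ line ++ "\n") w b, n + 1) := by
  have h0 : (n == (0:Int)) = false := by simpa using (by omega : ¬ n = 0)
  have h1 : decide (0 < n) = true := by simpa using hn
  by_cases hl : (line == "---") = true
  · have : line = "---" := by simpa using hl
    subst this
    simp [pvStepA, h0, h1]
    exact ⟨by decide, by rw [pvD3_getD_meta, pvD3_insert_meta]⟩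
  · simp [pvStepA, h0, h1, hl, pvD3_getD_meta, pvD3_insert_meta]

-- once in 'body', every remaining line is appended to body
theorem pvFoldBody (rest : List String) (m w b : String) (n : Int) (hn : 0 < n) :
    rest.foldl pvStepA ("body", pvD3 m w b, n)
      = ("body", pvD3 m w (b ++ pvJoinLines rest), (n + rest.length : Int)) := by
  induction rest generalizing b n with
  | nil => simp [pvJoinLines]
  | cons line rest ih =>
    rw [List.foldl_cons, pvStepA_body _ _ _ _ _ hn, ih _ _ (by omega)]
    simp [pvJoinLines, String.append_assoc]
    omega

-- in 'wfo': scan for the first line whose strip() is '---'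
theorem pvFoldWfo (rest : List String) (m w b : String) (n : Int) (hn : 0 < n) :
    rest.foldl pvStepA ("wfo", pvD3 m w b, n)
      = match rest.findIdx? (fun l => PySem.Str.strip l == "---") with
        | none => ("wfo", pvD3 m (w ++ pvJoinLines rest) b, (n + rest.length : Int))
        | some i => ("body", pvD3 m (w ++ pvJoinLines (rest.take (i + 1)))
                                    (b ++ pvJoinLines (rest.drop (i + 1))), (n + rest.length : Int)) := by
  induction rest generalizing w n with
  | nil => simp [pvJoinLines]
  | cons line rest ih =>
    rw [List.foldl_cons, pvStepA_wfo _ _ _ _ _ hn]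
    by_cases hs : (PySem.Str.strip line == "---") = true
    · rw [if_pos hs, pvFoldBody _ _ _ _ _ (by omega)]
      simp [List.findIdx?_cons, hs, pvJoinLines, String.append_assoc]
      omega
    · rw [if_neg hs, ih _ _ (by omega)]
      simp only [List.findIdx?_cons, hs]
      cases h : rest.findIdx? (fun l => PySem.Str.strip l == "---") with
      | none => simp [pvJoinLines, String.append_assoc]; omega
      | some i => simp [pvJoinLines, String.append_assoc]; omega

-- in 'meta': scan for the first exact '---'; it cascades straight to 'body'
theorem pvFoldMeta (rest : List String) (m w b : String) (n : Int) (hn : 0 < n) :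
    rest.foldl pvStepA ("meta", pvD3 m w b, n)
      = match rest.findIdx? (· == "---") with
        | none => ("meta", pvD3 (m ++ pvJoinLines rest) w b, (n + rest.length : Int))
        | some i => ("body", pvD3 (m ++ pvJoinLines (rest.take (i + 1))) w
                                    (b ++ pvJoinLines (rest.drop (i + 1))), (n + rest.length : Int)) := by
  induction rest generalizing m n with
  | nil => simp [pvJoinLines]
  | cons line rest ih =>
    rw [List.foldl_cons, pvStepA_meta _ _ _ _ _ hn]
    by_cases hl : (line == "---") = true
    · rw [if_pos hl, pvFoldBody _ _ _ _ _ (by omega)]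
      simp [List.findIdx?_cons, hl, pvJoinLines, String.append_assoc]
      omega
    · rw [if_neg hl, ih _ _ (by omega)]
      simp only [List.findIdx?_cons, hl]
      cases h : rest.findIdx? (fun l : String => l == "---") with
      | none => simp [pvJoinLines, String.append_assoc]; omega
      | some i => simp [pvJoinLines, String.append_assoc]; omega

-- the first iteration (lineCount = 0): picks the starting section
theorem pvStepA_first (line : String) :
    pvStepA ("meta", pvD3 "" "" "", 0) line
      = (if line == "---" then "meta" else "wfo",
         if line == "---" then pvD3 (line ++ "\n") "" "" else pvD3 "" (line ++ "\n") "", 1) := by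
  by_cases hl : (line == "---") = true
  · have : line = "---" := by simpa using hl
    subst this; decide
  · have hl' : line ≠ "---" := by simpa using hl
    simp [pvStepA, hl, hl']
    rw [pvD3_getD_wfo, pvD3_insert_wfo, String.empty_append]

-- ===== VERDICT (by name: the statement is the Claim_ definition above) =====
theorem splitFileContent_spec : Claim_equal_splitFileContent := by
  intro content _
  unfold Spec_splitFileContent splitFileContent splitFileContent_alt
  have hinit : (((PySem.Dict.empty.insert "meta" "").insert "wfo" "").insert "body" "")
      = pvD3 "" "" "" := rfl
  cases hls : PySem.Str.splitlines content with
  | nil => rfl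
  | cons l0 rest =>
    simp only [hinit, List.foldl_cons, pvStepA_first, List.drop_one, List.tail_cons,
      List.head?_cons]
    by_cases h0 : (l0 == "---") = true
    · have h0' : l0 = "---" := by simpa using h0
      subst h0'
      rw [if_pos (by decide), if_pos (by decide), if_pos (by decide)]
      rw [pvFoldMeta _ _ _ _ _ (by omega)]
      cases h : rest.findIdx? (fun l : String => l == "---") with
      | none => simp [pvD3, pvJoinLines]
      | some i => simp [pvD3, pvJoinLines, String.empty_append]
    · rw [if_neg h0, if_neg h0, if_neg (by simpa using h0)]
      rw [pvFoldWfo _ _ _ _ _ (by omega)]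
      cases h : rest.findIdx? (fun l => PySem.Str.strip l == "---") with
      | none => simp [pvD3, pvJoinLines]
      | some j => simp [pvD3, pvJoinLines, String.empty_append]
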